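-- pv_equiv track=rewrite | github.com/letonchanh/dynamite | src/analysis.py | _get_mutually_dependent_set
-- ===== SOURCE A (Python) =====
-- def _get_mutually_dependent_set(start, dg):
--     ws = [start]
--     visited = set()
--     while ws:
--         node = ws.pop(0)
--         if node not in dg:
--             return set()
--         else:
--             visited.add(node)
--             node_deps = dg[node]
--             for node_dep in node_deps:
--                 if node_dep not in visited:
--                     ws.append(node_dep)
--     return visited
-- ===== SOURCE B (Python) =====
-- def _get_mutually_dependent_set(start, dg):
--     # Round-based (semi-naive) saturation: instead of a FIFO worklist with an
--     # inline early return, compute the reachable closure by repeatedly expanding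
--     # the whole last delta at once until a round discovers nothing new, then
--     # validate the closure with a single subset test against the key set.
--     def step(reachable, delta):
--         new = []
--         for n in delta:
--             for d in dg.get(n, ()):
--                 if d not in reachable and d not in new:
--                     new.append(d)
--         return new
--
--     reachable = {start}
--     delta = [start]
--     while True:
--         new = step(reachable, delta)
--         if not new:
--             break
--         reachable |= set(new)
--         delta = new
--     return reachable if reachable <= dg.keys() else set()
-- ===== Notes on version B (the rewrite author's own statement) =====
-- stated objective: alternative
-- what changed: B replaces A's FIFO-worklist BFS (pop(0), late visited-marking so nodes can be re-enqueued and re-expanded, inline early return on a missing key) by round-based semi-naive fixpoint saturation: each round expands the entire previous delta at once into a duplicate-free 'new' list, unions it into the closure, and stops when a round adds nothing; a final subset test 'reachable <= dg.keys()' decides between the closure and set().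
import Mathlib
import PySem

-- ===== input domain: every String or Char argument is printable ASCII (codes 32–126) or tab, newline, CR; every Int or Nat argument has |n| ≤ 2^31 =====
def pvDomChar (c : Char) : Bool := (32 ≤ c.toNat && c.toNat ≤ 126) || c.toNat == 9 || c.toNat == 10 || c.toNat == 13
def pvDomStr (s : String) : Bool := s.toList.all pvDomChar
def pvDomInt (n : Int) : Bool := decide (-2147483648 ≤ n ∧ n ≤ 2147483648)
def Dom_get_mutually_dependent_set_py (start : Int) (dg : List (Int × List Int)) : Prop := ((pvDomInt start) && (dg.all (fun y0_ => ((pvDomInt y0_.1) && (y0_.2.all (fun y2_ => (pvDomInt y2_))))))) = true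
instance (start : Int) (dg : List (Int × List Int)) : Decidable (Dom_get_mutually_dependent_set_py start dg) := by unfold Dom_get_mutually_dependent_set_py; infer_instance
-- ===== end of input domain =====

-- B replaces A's FIFO-worklist pass (pop(0), late visited-marking, inline early return)
-- by round-based semi-naive fixpoint saturation with a final subset validation pass.


-- ===== PORT A =====
-- A's loop: pop the head of ws; a node missing from dg aborts with set(); otherwise mark it
-- visited and enqueue each dependency not yet visited ("if node_dep not in visited: ws.append").
def pvALoop (dg : PySem.Dict Int (List Int)) (ws : List Int) (visited : PySem.Set Int) : List Int :=
  match ws with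
  | [] => visited
  | node :: rest =>
    match h : dg.get? node with
    | none => []
    | some node_deps =>
      pvALoop dg
        (node_deps.foldl
          (fun w node_dep =>
            if !(PySem.Set.contains (PySem.Set.add visited node) node_dep) then w ++ [node_dep] else w)
          rest)
        (PySem.Set.add visited node)
termination_by (((dg.keys.toFinset) \ visited.toFinset).card,
                (ws.filter (fun x => PySem.Set.contains visited x)).length)
decreasing_by
  simp only [dite_eq_ite]
  rw [PySem.List.foldl_append_if]
  by_cases hc : node ∈ visited
  · rw [PySem.Set.add_of_mem hc]
    apply Prod.Lex.right
    simp [List.filter_append, List.filter_filter, hc]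
  · apply Prod.Lex.left
    have hkey : node ∈ dg.keys := by
      by_contra hk
      rw [← PySem.Dict.get?_eq_none_iff_not_mem_keys] at hk
      simp [hk] at h
    rw [PySem.Set.add_of_not_mem hc]
    apply Finset.card_lt_card
    constructor
    · intro x hx
      simp only [Finset.mem_sdiff, List.mem_toFinset, List.mem_append] at hx ⊢
      exact ⟨hx.1, fun h => hx.2 (Or.inl h)⟩
    · intro hsub
      have : node ∈ dg.keys.toFinset \ visited.toFinset := by
        simp [Finset.mem_sdiff, hkey, hc]
      have := hsub this
      simp [Finset.mem_sdiff] at this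

def get_mutually_dependent_set_py (start : Int) (dg : List (Int × List Int)) : List Int :=
  pvALoop (PySem.Dict.ofList dg) [start] PySem.Set.empty

-- ===== PORT B =====
-- B's step(reachable, delta): one full round over the previous delta, collecting the
-- dependencies not yet reached and not yet collected this round, in discovery order.
def pvStep (dg : PySem.Dict Int (List Int)) (reachable : PySem.Set Int) (delta : List Int) : List Int :=
  delta.foldl
    (fun new n =>
      (dg.getD n []).foldl
        (fun new d =>
          if !(PySem.Set.contains reachable d) && !(new.contains d) then new ++ [d] else new)
        new)
    []

-- pvNew seen l: the sublist of l of first occurrences of elements not in seen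
-- (the proof-side normal form of a dedup-at-append pass; pvSat's termination cites
-- pvStep_foldl / mem_pvNew below, so these stay above the port).
def pvNew (seen : List Int) : List Int → List Int
  | [] => []
  | d :: ds => if d ∈ seen then pvNew seen ds else d :: pvNew (seen ++ [d]) ds

theorem mem_pvNew {x : Int} (seen : List Int) (l : List Int) :
    x ∈ pvNew seen l ↔ x ∈ l ∧ x ∉ seen := by
  induction l generalizing seen with
  | nil => simp [pvNew]
  | cons d ds ih =>
    by_cases hd : d ∈ seen
    · rw [pvNew, if_pos hd, ih]
      simp only [List.mem_cons]
      constructor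
      · tauto
      · rintro ⟨rfl | h1, h2⟩ <;> tauto
    · rw [pvNew, if_neg hd]
      simp only [List.mem_cons, ih, List.mem_append]
      by_cases hx : x = d <;> simp [hx, hd]

theorem pvNew_append (s xs ys : List Int) :
    pvNew s (xs ++ ys) = pvNew s xs ++ pvNew (s ++ pvNew s xs) ys := by
  induction xs generalizing s with
  | nil => simp [pvNew]
  | cons d ds ih =>
    by_cases hd : d ∈ s
    · simp [pvNew, hd, ih]
    · simp only [List.cons_append, pvNew, if_neg hd, ih]
      simp [List.append_assoc]

-- the inner 'for d in dg.get(n, ())' round loop, from an arbitrary accumulator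
theorem pvStep_inner (r : PySem.Set Int) (deps new : List Int) :
    deps.foldl
      (fun new d =>
        if !(PySem.Set.contains r d) && !(new.contains d) then new ++ [d] else new)
      new
    = new ++ pvNew (r ++ new) deps := by
  induction deps generalizing new with
  | nil => simp [pvNew]
  | cons d ds ih =>
    by_cases hmem : d ∈ r ++ new
    · have hcond : (!(PySem.Set.contains r d) && !(new.contains d)) = false := by
        rcases List.mem_append.1 hmem with h1 | h2
        · simp
          exact fun hc => absurd h1 hc
        · simp
          exact fun _ => h2
      simp only [List.foldl_cons, hcond, if_neg Bool.false_ne_true, ih, pvNew, if_pos hmem]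
    · have h1 : d ∉ r := fun h => hmem (List.mem_append_left _ h)
      have h2 : d ∉ new := fun h => hmem (List.mem_append_right _ h)
      have hcond : (!(PySem.Set.contains r d) && !(new.contains d)) = true := by
        simp
        exact ⟨h1, h2⟩
      simp only [List.foldl_cons, hcond, ih, pvNew, if_neg hmem]
      simp [List.append_assoc]

-- B's whole round: pvStep is the dedup'd flatMap of the delta's dependency lists
theorem pvStep_foldl (dg : PySem.Dict Int (List Int)) (r : PySem.Set Int) (delta : List Int) :
    pvStep dg r delta = pvNew r (delta.flatMap (fun n => dg.getD n [])) := by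
  suffices h : ∀ new0 : List Int,
      delta.foldl
        (fun new n =>
          (dg.getD n []).foldl
            (fun new d =>
              if !(PySem.Set.contains r d) && !(new.contains d) then new ++ [d] else new)
            new)
        new0
      = new0 ++ pvNew (r ++ new0) (delta.flatMap (fun n => dg.getD n [])) by
    have := h []
    simpa [pvStep] using this
  induction delta with
  | nil => intro new0; simp [pvNew]
  | cons n ds ih =>
    intro new0
    rw [List.foldl_cons, pvStep_inner, ih, List.flatMap_cons, pvNew_append]
    simp [List.append_assoc]

-- membership facts for the round result (cited by pvSat's termination)
theorem mem_pvStep {x : Int} (dg : PySem.Dict Int (List Int)) (r : PySem.Set Int)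
    (delta : List Int) (hx : x ∈ pvStep dg r delta) :
    x ∉ r ∧ x ∈ dg.items.flatMap (fun p => p.2) := by
  rw [pvStep_foldl] at hx
  obtain ⟨hmem, hnr⟩ := (mem_pvNew r _).1 hx
  refine ⟨hnr, ?_⟩
  obtain ⟨n, -, hd⟩ := List.mem_flatMap.1 hmem
  rcases hg : dg.get? n with _ | l
  · rw [PySem.Dict.getD_of_get?_eq_none dg [] hg] at hd
    simp at hd
  · rw [PySem.Dict.getD_of_get?_eq_some dg [] hg] at hd
    have : (List.find? (fun p => p.1 == n) dg.items).map Prod.snd = some l := hg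
    rcases Option.map_eq_some_iff.1 this with ⟨p, hp, hpl⟩
    exact List.mem_flatMap.2 ⟨p, List.mem_of_find?_eq_some hp, hpl ▸ hd⟩

-- B's outer loop: 'while True: new = step(...); if not new: break; reachable |= set(new); delta = new'
def pvSat (dg : PySem.Dict Int (List Int)) (reachable : PySem.Set Int) (delta : List Int) : PySem.Set Int :=
  let new := pvStep dg reachable delta
  if h : new = [] then reachable
  else pvSat dg (PySem.Set.update reachable new) new
termination_by (((dg.items.flatMap (fun p => p.2)).toFinset) \ reachable.toFinset).card
decreasing_by
  rcases hn : pvStep dg reachable delta with _ | ⟨d, ds⟩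
  · exact absurd hn h
  · have hd : d ∈ pvStep dg reachable delta := by rw [hn]; exact List.mem_cons_self
    obtain ⟨hnr, hdv⟩ := mem_pvStep dg reachable delta hd
    apply Finset.card_lt_card
    constructor
    · intro x hx
      simp only [Finset.mem_sdiff, List.mem_toFinset] at hx ⊢
      exact ⟨hx.1, fun hm => hx.2 ((PySem.Set.mem_update _ _ _).2 (Or.inl hm))⟩
    · intro hsub
      have hmem : d ∈ (dg.items.flatMap (fun p => p.2)).toFinset \ reachable.toFinset := by
        simp [Finset.mem_sdiff, hdv, hnr]
      have := hsub hmem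
      simp only [Finset.mem_sdiff, List.mem_toFinset] at this
      exact this.2 ((PySem.Set.mem_update _ _ _).2 (Or.inr List.mem_cons_self))

def get_mutually_dependent_set_py_alt (start : Int) (dg : List (Int × List Int)) : List Int :=
  let d := PySem.Dict.ofList dg
  let reachable := pvSat d (PySem.Set.ofList [start]) [start]
  -- 'reachable <= dg.keys()': subset test of the closure against the key view
  if PySem.Set.issubset reachable d.keys then reachable else []

-- ===== PRECONDITION & SPEC =====
def Spec_get_mutually_dependent_set_py (start : Int) (dg : List (Int × List Int)) (out : List Int) : Prop := out = get_mutually_dependent_set_py_alt start dg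
instance (start : Int) (dg : List (Int × List Int)) (out : List Int) : Decidable (Spec_get_mutually_dependent_set_py start dg out) := by unfold Spec_get_mutually_dependent_set_py; infer_instance

-- ===== CLAIM (what is proved, stated in full; the proofs are below) =====
def Claim_equal_get_mutually_dependent_set_py : Prop := ∀ (start : Int) (dg : List (Int × List Int)), Dom_get_mutually_dependent_set_py start dg → Spec_get_mutually_dependent_set_py start dg (get_mutually_dependent_set_py start dg)

-- ===== LEMMAS AND PROOFS =====

theorem pvNew_eq_nil (s l : List Int) (h : ∀ y ∈ l, y ∈ s) : pvNew s l = [] := by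
  induction l generalizing s with
  | nil => rfl
  | cons d ds ih =>
    rw [pvNew, if_pos (h d (List.mem_cons_self ..))]
    exact ih s (fun y hy => h y (List.mem_cons_of_mem _ hy))

theorem pvNew_filter (s vis l : List Int) (hsub : ∀ x ∈ vis, x ∈ s) :
    pvNew s (l.filter (fun d => !(PySem.Set.contains vis d))) = pvNew s l := by
  induction l generalizing s with
  | nil => rfl
  | cons d ds ih =>
    by_cases hv : d ∈ vis
    · rw [List.filter_cons_of_neg (by simp [hv]), ih s hsub,
        pvNew, if_pos (hsub d hv)]
    · rw [List.filter_cons_of_pos (by simp [hv])]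
      by_cases hs : d ∈ s
      · rw [pvNew, if_pos hs, pvNew, if_pos hs, ih s hsub]
      · rw [pvNew, if_neg hs, pvNew, if_neg hs,
          ih (s ++ [d]) (fun x hx => List.mem_append_left _ (hsub x hx))]

theorem nodup_pvNew (s l : List Int) : (pvNew s l).Nodup := by
  induction l generalizing s with
  | nil => exact List.nodup_nil
  | cons d ds ih =>
    by_cases hd : d ∈ s
    · rw [pvNew, if_pos hd]; exact ih s
    · rw [pvNew, if_neg hd]
      refine List.nodup_cons.2 ⟨fun hmem => ?_, ih (s ++ [d])⟩
      have := (mem_pvNew (s ++ [d]) ds).1 hmem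
      exact this.2 (List.mem_append_right _ (List.mem_singleton.2 rfl))

-- A's worklist loop, restated as the dedup-at-enqueue loop it simulates (proof-side only)
-- B's inner "enqueue the unseen" pass in the (queue, seen) form used by pvBLoop
theorem pvEnqStep_foldl (deps : List Int) (rest : List Int) (seen : PySem.Set Int) :
    deps.foldl
      (fun (p : List Int × PySem.Set Int) d =>
        if PySem.Set.contains p.2 d then p else (p.1 ++ [d], PySem.Set.add p.2 d))
      (rest, seen)
    = (rest ++ pvNew seen deps, seen ++ pvNew seen deps) := by
  induction deps generalizing rest seen with
  | nil => simp [pvNew]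
  | cons d ds ih =>
    by_cases hd : d ∈ seen
    · simp only [List.foldl_cons, (PySem.Set.contains_iff _ _).2 hd, if_true, pvNew, ih]
      simp [hd]
    · have hcf : PySem.Set.contains seen d = false := by
        by_contra h
        exact hd ((PySem.Set.contains_iff _ _).1 (by simpa using h))
      simp only [List.foldl_cons, hcf, if_neg Bool.false_ne_true,
        PySem.Set.add_of_not_mem hd, ih, pvNew, if_neg hd]
      simp

def pvBLoop (dg : PySem.Dict Int (List Int)) (queue : List Int) (seen : PySem.Set Int) : PySem.Set Int :=
  match queue with
  | [] => seen
  | node :: rest =>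
    let st := (dg.getD node []).foldl
      (fun (p : List Int × PySem.Set Int) d =>
        if PySem.Set.contains p.2 d then p else (p.1 ++ [d], PySem.Set.add p.2 d))
      (rest, seen)
    pvBLoop dg st.1 st.2
termination_by ((((dg.items.flatMap (fun p => p.2)).toFinset) \ seen.toFinset).card, queue.length)
decreasing_by
  simp only [dite_eq_ite]
  rw [pvEnqStep_foldl]
  rcases hn : pvNew seen (dg.getD node []) with _ | ⟨d, ds⟩
  · simp only [List.append_nil]
    apply Prod.Lex.right
    simp
  · apply Prod.Lex.left
    have hd : d ∈ pvNew seen (dg.getD node []) := by rw [hn]; exact List.mem_cons_self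
    have hd' := (mem_pvNew seen _).1 hd
    have hdv : d ∈ dg.items.flatMap (fun p => p.2) := by
      rcases hg : dg.get? node with _ | l
      · rw [PySem.Dict.getD_of_get?_eq_none dg [] hg] at hd'
        simp at hd'
      · rw [PySem.Dict.getD_of_get?_eq_some dg [] hg] at hd'
        have : (List.find? (fun p => p.1 == node) dg.items).map Prod.snd = some l := hg
        rcases Option.map_eq_some_iff.1 this with ⟨p, hp, hpl⟩
        exact List.mem_flatMap.2 ⟨p, List.mem_of_find?_eq_some hp, hpl ▸ hd'.1⟩
    apply Finset.card_lt_card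
    constructor
    · intro x hx
      simp only [Finset.mem_sdiff, List.mem_toFinset, List.mem_append] at hx ⊢
      exact ⟨hx.1, fun h => hx.2 (Or.inl h)⟩
    · intro hsub
      have hmem : d ∈ (dg.items.flatMap (fun p => p.2)).toFinset \ seen.toFinset := by
        simp [Finset.mem_sdiff, hdv, hd'.2]
      have := hsub hmem
      simp only [Finset.mem_sdiff, List.mem_toFinset, List.mem_append] at this
      exact this.2 (Or.inr (by simp))

theorem pvBLoop_cons (dg : PySem.Dict Int (List Int)) (node : Int) (rest : List Int)
    (seen : PySem.Set Int) :
    pvBLoop dg (node :: rest) seen =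
      pvBLoop dg (rest ++ pvNew seen (dg.getD node [])) (seen ++ pvNew seen (dg.getD node [])) := by
  conv_lhs => rw [pvBLoop]
  rw [pvEnqStep_foldl]

theorem pvBLoop_mono (dg : PySem.Dict Int (List Int)) (q : List Int) (s : PySem.Set Int) :
    ∃ ext, pvBLoop dg q s = s ++ ext := by
  fun_induction pvBLoop dg q s with
  | case1 => exact ⟨[], by simp⟩
  | case2 s node rest st ih =>
    obtain ⟨e, he⟩ := ih
    have hst : st = (rest ++ pvNew s (dg.getD node []), s ++ pvNew s (dg.getD node [])) :=
      pvEnqStep_foldl (dg.getD node []) rest s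
    refine ⟨pvNew s (dg.getD node []) ++ e, ?_⟩
    rw [he, hst]
    simp [List.append_assoc]

-- the run invariant of A's loop: every visited node is a key and each of its
-- dependencies has already been visited or is still in the worklist
def pvGood (dg : PySem.Dict Int (List Int)) (vis ws : List Int) : Prop :=
  ∀ v ∈ vis, ∃ l, dg.get? v = some l ∧ ∀ x ∈ l, x ∈ vis ∨ x ∈ ws

theorem pv_sim (dg : PySem.Dict Int (List Int)) (ws vis : List Int) :
    pvGood dg vis ws →
    pvALoop dg ws vis =
      (if (pvBLoop dg (pvNew vis ws) (vis ++ pvNew vis ws)).all (fun n => dg.contains n) = true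
        then pvBLoop dg (pvNew vis ws) (vis ++ pvNew vis ws) else []) := by
  fun_induction pvALoop dg ws vis with
  | case1 vis =>
    intro hg
    have hb : pvBLoop dg (pvNew vis []) (vis ++ pvNew vis []) = vis := by
      show pvBLoop dg [] (vis ++ []) = vis
      rw [pvBLoop]
      simp
    rw [hb]
    have hall : vis.all (fun n => dg.contains n) = true := by
      rw [List.all_eq_true]
      intro v hv
      obtain ⟨l, hl, -⟩ := hg v hv
      rw [PySem.Dict.contains_eq_isSome_get?, hl]; rfl
    rw [if_pos hall]
  | case2 vis node rest h =>
    intro hg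
    have hnv : node ∉ vis := fun hv => by
      obtain ⟨l, hl, -⟩ := hg node hv
      rw [h] at hl; cases hl
    obtain ⟨ext, hext⟩ := pvBLoop_mono dg (pvNew vis (node :: rest)) (vis ++ pvNew vis (node :: rest))
    have hmem : node ∈ pvBLoop dg (pvNew vis (node :: rest)) (vis ++ pvNew vis (node :: rest)) := by
      rw [hext]
      refine List.mem_append_left _ (List.mem_append_right _ ?_)
      rw [pvNew, if_neg hnv]
      exact List.mem_cons_self ..
    have hcond : ¬ ((pvBLoop dg (pvNew vis (node :: rest)) (vis ++ pvNew vis (node :: rest))).all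
        (fun n => dg.contains n) = true) := by
      intro hall
      rw [List.all_eq_true] at hall
      have := hall node hmem
      rw [PySem.Dict.contains_eq_isSome_get?, h] at this
      cases this
    rw [if_neg hcond]
  | case3 vis node rest node_deps h ih =>
    intro hg
    simp only [dite_eq_ite] at ih ⊢
    rw [PySem.List.foldl_append_if] at ih ⊢
    simp only [List.map_id'] at ih ⊢
    by_cases hc : node ∈ vis
    · rw [PySem.Set.add_of_mem hc] at ih ⊢
      obtain ⟨l, hl, hldep⟩ := hg node hc
      have hlnd : l = node_deps := by
        rw [h] at hl
        exact (Option.some.inj hl).symm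
      rw [hlnd] at hldep
      have hg' : pvGood dg vis (rest ++ List.filter (fun d => !vis.contains d) node_deps) := by
        intro v hv
        obtain ⟨l', hl', hmem⟩ := hg v hv
        refine ⟨l', hl', fun x hx => ?_⟩
        rcases hmem x hx with hxv | hxw
        · exact Or.inl hxv
        · rcases List.mem_cons.1 hxw with rfl | hxr
          · exact Or.inl hc
          · exact Or.inr (List.mem_append_left _ hxr)
      have hpv : pvNew vis (rest ++ List.filter (fun d => !vis.contains d) node_deps)
          = pvNew vis (node :: rest) := by
        rw [pvNew_append, pvNew, if_pos hc]
        have : pvNew (vis ++ pvNew vis rest) (List.filter (fun d => !vis.contains d) node_deps) = [] := by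
          apply pvNew_eq_nil
          intro y hy
          rw [List.mem_filter] at hy
          have hyv : y ∉ vis := by
            intro hyv
            rw [(PySem.Set.contains_iff vis y).2 hyv] at hy
            simp at hy
          rcases hldep y hy.1 with hv1 | hv2
          · exact absurd hv1 hyv
          · rcases List.mem_cons.1 hv2 with rfl | hyr
            · exact absurd hc hyv
            · exact List.mem_append_right _ ((mem_pvNew vis rest).2 ⟨hyr, hyv⟩)
        rw [this, List.append_nil]
      rw [ih hg', hpv]
    · rw [PySem.Set.add_of_not_mem hc] at ih ⊢
      have hg' : pvGood dg (vis ++ [node])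
          (rest ++ List.filter (fun d => !(vis ++ [node]).contains d) node_deps) := by
        intro v hv
        rcases List.mem_append.1 hv with hv1 | hv2
        · obtain ⟨l', hl', hmem⟩ := hg v hv1
          refine ⟨l', hl', fun x hx => ?_⟩
          rcases hmem x hx with hxv | hxw
          · exact Or.inl (List.mem_append_left _ hxv)
          · rcases List.mem_cons.1 hxw with rfl | hxr
            · exact Or.inl (List.mem_append_right _ (List.mem_singleton.2 rfl))
            · exact Or.inr (List.mem_append_left _ hxr)
        · rw [List.mem_singleton] at hv2
          rw [hv2]
          refine ⟨node_deps, h, fun x hx => ?_⟩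
          by_cases hxv : x ∈ vis ++ [node]
          · exact Or.inl hxv
          · refine Or.inr (List.mem_append_right _ ?_)
            rw [List.mem_filter]
            exact ⟨hx, by simp [hxv]⟩
      rw [ih hg']
      have hq : pvNew vis (node :: rest) = node :: pvNew (vis ++ [node]) rest := by
        rw [pvNew, if_neg hc]
      have hgetd : dg.getD node [] = node_deps := PySem.Dict.getD_of_get?_eq_some dg [] h
      have hstep : pvBLoop dg (pvNew vis (node :: rest)) (vis ++ pvNew vis (node :: rest))
          = pvBLoop dg
              (pvNew (vis ++ [node]) (rest ++ List.filter (fun d => !(vis ++ [node]).contains d) node_deps))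
              ((vis ++ [node]) ++ pvNew (vis ++ [node]) (rest ++ List.filter (fun d => !(vis ++ [node]).contains d) node_deps)) := by
        rw [hq, pvBLoop_cons, hgetd]
        have hseed2 : vis ++ node :: pvNew (vis ++ [node]) rest
            = (vis ++ [node]) ++ pvNew (vis ++ [node]) rest := by simp
        rw [hseed2]
        have harg : pvNew (vis ++ [node]) (rest ++ List.filter (fun d => !(vis ++ [node]).contains d) node_deps)
            = pvNew (vis ++ [node]) rest
              ++ pvNew ((vis ++ [node]) ++ pvNew (vis ++ [node]) rest) node_deps := by
          rw [pvNew_append, pvNew_filter ((vis ++ [node]) ++ pvNew (vis ++ [node]) rest) (vis ++ [node])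
            node_deps (fun x hx => List.mem_append_left _ hx)]
        rw [harg]
        congr 1
        simp
      rw [hstep]

-- one full sweep of pvBLoop over a level prefix
theorem pvBLoop_sweep (dg : PySem.Dict Int (List Int)) (delta : List Int) :
    ∀ (carry : List Int) (s : PySem.Set Int),
    pvBLoop dg (delta ++ carry) s
      = pvBLoop dg (carry ++ pvNew s (delta.flatMap (fun n => dg.getD n [])))
          (s ++ pvNew s (delta.flatMap (fun n => dg.getD n []))) := by
  induction delta with
  | nil => intro carry s; simp [pvNew]
  | cons n ds ih =>
    intro carry s
    rw [List.cons_append, pvBLoop_cons, List.append_assoc,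
      ih (carry ++ pvNew s (dg.getD n [])) (s ++ pvNew s (dg.getD n []))]
    rw [List.flatMap_cons, pvNew_append]
    simp [List.append_assoc]

theorem pvBLoop_eq_pvSat (dg : PySem.Dict Int (List Int)) (r : PySem.Set Int) (delta : List Int) :
    pvBLoop dg delta r = pvSat dg r delta := by
  fun_induction pvSat dg r delta with
  | case1 r delta new hnil =>
    have hdef : pvStep dg r delta = new := rfl
    have hsweep := pvBLoop_sweep dg delta [] r
    rw [List.append_nil, ← pvStep_foldl, hdef, hnil] at hsweep
    rw [hsweep]
    simp only [List.append_nil]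
    rw [pvBLoop]
  | case2 r delta new hne ih =>
    have hdef : pvStep dg r delta = new := rfl
    have hsweep := pvBLoop_sweep dg delta [] r
    rw [List.append_nil, ← pvStep_foldl, hdef, List.nil_append] at hsweep
    have hupd : PySem.Set.update r new = r ++ new := by
      apply PySem.Set.update_eq_append_of_disjoint
      · rw [← hdef, pvStep_foldl]
        exact nodup_pvNew ..
      · intro x hx
        exact (mem_pvStep dg r delta (by rw [hdef]; exact hx)).1
    rw [hsweep, ← hupd, ih]

theorem pv_all_eq_issubset (dg : List (Int × List Int)) (l : List Int) :
    l.all (fun n => (PySem.Dict.ofList dg).contains n)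
      = PySem.Set.issubset l (PySem.Dict.ofList dg).keys := by
  by_cases hall : ∀ x ∈ l, x ∈ (PySem.Dict.ofList dg).keys
  · have h1 : l.all (fun n => (PySem.Dict.ofList dg).contains n) = true := by
      rw [List.all_eq_true]
      intro v hv
      rw [PySem.Dict.contains_eq_isSome_get?]
      rcases hg : PySem.Dict.get? (PySem.Dict.ofList dg) v with _ | w
      · exact absurd ((PySem.Dict.get?_eq_none_iff_not_mem_keys _ _).1 hg) (not_not.2 (hall v hv))
      · rfl
    rw [h1, (PySem.Set.issubset_iff _ _).2 hall]
  · push_neg at hall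
    obtain ⟨x, hxl, hxk⟩ := hall
    have h1 : l.all (fun n => (PySem.Dict.ofList dg).contains n) = false := by
      rw [List.all_eq_false]
      refine ⟨x, hxl, ?_⟩
      rw [PySem.Dict.contains_eq_isSome_get?,
        (PySem.Dict.get?_eq_none_iff_not_mem_keys _ _).2 hxk]
      simp
    have h2 : PySem.Set.issubset l (PySem.Dict.ofList dg).keys = false := by
      by_contra hc
      exact hxk ((PySem.Set.issubset_iff _ _).1 (by simpa using hc) x hxl)
    rw [h1, h2]

-- ===== VERDICT (by name: the statement is the Claim_ definition above) =====
theorem get_mutually_dependent_set_py_spec : Claim_equal_get_mutually_dependent_set_py := by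
  intro start dg _
  unfold Spec_get_mutually_dependent_set_py get_mutually_dependent_set_py
  have halt : get_mutually_dependent_set_py_alt start dg =
      (if PySem.Set.issubset (pvSat (PySem.Dict.ofList dg) (PySem.Set.ofList [start]) [start])
          (PySem.Dict.ofList dg).keys = true
        then pvSat (PySem.Dict.ofList dg) (PySem.Set.ofList [start]) [start] else []) := rfl
  rw [halt]
  have hset : PySem.Set.ofList [start] = [start] := by
    simp [PySem.Set.ofList, PySem.Set.add, PySem.Set.empty]
  rw [hset, ← pvBLoop_eq_pvSat]
  have h := pv_sim (PySem.Dict.ofList dg) [start] [] (fun v hv => absurd hv List.not_mem_nil)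
  have hnew : pvNew [] [start] = [start] := by simp [pvNew]
  rw [hnew] at h
  simp only [List.nil_append] at h
  have hemp : pvALoop (PySem.Dict.ofList dg) [start] PySem.Set.empty
      = pvALoop (PySem.Dict.ofList dg) [start] [] := rfl
  rw [hemp, h, pv_all_eq_issubset]
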